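-- pv_equiv track=rewrite | github.com/shaktitrigent/Phoenix-SmartLocatorAI | src/phoenix_smartlocatorai/page_object_exporter.py | _select_best_per_name
-- ===== SOURCE A (Python) =====
-- from typing import Dict, List, Tuple
--
-- def _prefer_order_playwright(locator_type: str) -> int:
--     order = {
--         "Role Selector": 0,
--         "CSS Selector": 1,
--         "Text Selector": 2,
--         "XPath": 3,
--     }
--     return order.get(locator_type, 9)
--
-- def _prefer_order_selenium(locator_type: str) -> int:
--     order = {
--         "CSS Selector": 0,
--         "XPath": 1,
--     }
--     return order.get(locator_type, 9)
--
-- def _select_best_per_name(locators: List[Dict], framework: str) -> Dict[str, Dict]: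
--     """Select the best locator per custom_name for the target framework.
--     Preference: highest stability_score, then by framework-specific type order.
--     """
--     best: Dict[str, Dict] = {}
--     for loc in locators:
--         name = loc.get("custom_name") or "Element"
--         # Filter by automation_tool compatibility
--         tool = loc.get("automation_tool", "Both")
--         if framework == "playwright" and tool not in ("Playwright", "Both"):
--             continue
--         if framework == "selenium" and tool not in ("Selenium", "Both"):
--             continue
--
--         curr = best.get(name)
--         if not curr:
--             best[name] = loc
--             continue
--
--         curr_score = int(curr.get("stability_score", 0))
--         new_score = int(loc.get("stability_score", 0))
--         if new_score > curr_score: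
--             best[name] = loc
--             continue
--         if new_score == curr_score:
--             if framework == "playwright":
--                 if _prefer_order_playwright(loc.get("locator_type", "")) < _prefer_order_playwright(curr.get("locator_type", "")):
--                     best[name] = loc
--             else:
--                 if _prefer_order_selenium(loc.get("locator_type", "")) < _prefer_order_selenium(curr.get("locator_type", "")):
--                     best[name] = loc
--
--     return best
-- ===== SOURCE B (Python) =====
-- from functools import reduce
-- from typing import Dict, List
--
--
-- def _select_best_per_name(locators: List[Dict], framework: str) -> Dict[str, Dict]:
--     """Group compatible locators by name (one pass), then reduce each group to its
--     best element; reduce keeps the earlier element on full ties."""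
--
--     def order_fn(loc_type):
--         if framework == "playwright":
--             return {"Role Selector": 0, "CSS Selector": 1, "Text Selector": 2, "XPath": 3}.get(loc_type, 9)
--         return {"CSS Selector": 0, "XPath": 1}.get(loc_type, 9)
--
--     def compatible(loc):
--         tool = loc.get("automation_tool", "Both")
--         if framework == "playwright":
--             return tool in ("Playwright", "Both")
--         if framework == "selenium":
--             return tool in ("Selenium", "Both")
--         return True
--
--     def better(curr, new):
--         if not curr:
--             return new
--         curr_score = int(curr.get("stability_score", 0))
--         new_score = int(new.get("stability_score", 0))
--         if new_score > curr_score: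
--             return new
--         if new_score == curr_score and order_fn(new.get("locator_type", "")) < order_fn(curr.get("locator_type", "")):
--             return new
--         return curr
--
--     groups: Dict[str, List[Dict]] = {}
--     for loc in locators:
--         if compatible(loc):
--             groups.setdefault(loc.get("custom_name") or "Element", []).append(loc)
--
--     return {name: reduce(better, group) for name, group in groups.items()}
-- ===== Notes on version B (the rewrite author's own statement) =====
-- stated objective: alternative
-- what changed: Replaces A's incremental best-keeping fold (a dict of current winners updated in place with a compare against the stored best) by a group-then-reduce structure: one pass collects compatible locators into per-name groups, then each group is reduced with functools.reduce and a binary better() comparator.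
import Mathlib
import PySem

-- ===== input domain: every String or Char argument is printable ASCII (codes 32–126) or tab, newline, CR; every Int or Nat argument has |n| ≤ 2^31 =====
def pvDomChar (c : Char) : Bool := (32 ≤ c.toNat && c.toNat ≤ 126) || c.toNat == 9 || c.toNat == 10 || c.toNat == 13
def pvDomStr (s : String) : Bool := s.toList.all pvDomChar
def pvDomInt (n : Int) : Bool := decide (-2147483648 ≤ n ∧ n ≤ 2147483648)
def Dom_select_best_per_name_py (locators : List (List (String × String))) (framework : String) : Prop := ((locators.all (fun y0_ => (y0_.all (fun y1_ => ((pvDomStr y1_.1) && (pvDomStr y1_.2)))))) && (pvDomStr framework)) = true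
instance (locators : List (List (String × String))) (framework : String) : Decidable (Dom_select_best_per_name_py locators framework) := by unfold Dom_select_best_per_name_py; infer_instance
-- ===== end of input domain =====

-- B replaces A's incremental best-keeping fold by group-then-reduce (one pass collects per-name
-- groups, then each group is folded with a binary `better`); objective: alternative structure, same cost.


-- ===== PORT A =====
-- shared module-level helpers: dict.get on an association-list dict (first match), the two
-- _prefer_order_* functions (their literal dict .get becomes the equivalent if-chain),
-- `loc.get("custom_name") or "Element"` and `int(loc.get("stability_score", 0))`.
def pvGet (loc : List (String × String)) (k : String) : Option String :=
  (loc.find? (fun p => p.1 == k)).map (·.2)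

def pvGetD (loc : List (String × String)) (k d : String) : String :=
  (pvGet loc k).getD d

def prefer_order_playwright (t : String) : Int :=
  if t = "Role Selector" then 0 else if t = "CSS Selector" then 1
  else if t = "Text Selector" then 2 else if t = "XPath" then 3 else 9

def prefer_order_selenium (t : String) : Int :=
  if t = "CSS Selector" then 0 else if t = "XPath" then 1 else 9

def pvName (loc : List (String × String)) : String :=
  match pvGet loc "custom_name" with
  | none => "Element"
  | some s => if s = "" then "Element" else s

-- int(loc.get("stability_score", 0)); Pre_ guarantees the string parses wherever Python calls int()
def pvScore (loc : List (String × String)) : Int :=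
  match pvGet loc "stability_score" with
  | none => 0
  | some v => (PySem.Int.ofStr? v).getD 0

-- the body of A's for-loop (best-keeping update for one locator)
def pvStepA (framework : String) (best : PySem.Dict String (List (String × String)))
    (loc : List (String × String)) : PySem.Dict String (List (String × String)) :=
  let name := pvName loc
  let tool := pvGetD loc "automation_tool" "Both"
  if framework = "playwright" ∧ ¬(tool = "Playwright" ∨ tool = "Both") then best
  else if framework = "selenium" ∧ ¬(tool = "Selenium" ∨ tool = "Both") then best
  else
    match best.get? name with
    | none => best.insert name loc
    | some curr =>
      if curr = [] then best.insert name loc   -- `if not curr` (an empty dict is falsy)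
      else
        let curr_score := pvScore curr
        let new_score := pvScore loc
        if new_score > curr_score then best.insert name loc
        else if new_score = curr_score then
          if framework = "playwright" then
            if prefer_order_playwright (pvGetD loc "locator_type" "") <
               prefer_order_playwright (pvGetD curr "locator_type" "") then best.insert name loc else best
          else
            if prefer_order_selenium (pvGetD loc "locator_type" "") <
               prefer_order_selenium (pvGetD curr "locator_type" "") then best.insert name loc else best
        else best

def select_best_per_name_py (locators : List (List (String × String))) (framework : String) :
    List (String × List (String × String)) :=
  (locators.foldl (pvStepA framework) PySem.Dict.empty).items

-- ===== PORT B =====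
-- Source B's order_fn closure
def pvOrderFn (framework : String) (loc_type : String) : Int :=
  if framework = "playwright" then prefer_order_playwright loc_type else prefer_order_selenium loc_type

-- Source B's compatible closure
def pvCompatible (framework : String) (loc : List (String × String)) : Bool :=
  let tool := pvGetD loc "automation_tool" "Both"
  if framework = "playwright" then tool == "Playwright" || tool == "Both"
  else if framework = "selenium" then tool == "Selenium" || tool == "Both"
  else true

-- Source B's better closure
def pvBetter (framework : String) (curr new : List (String × String)) : List (String × String) :=
  if curr = [] then new   -- `if not curr` (an empty dict is falsy)
  else
    let curr_score := pvScore curr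
    let new_score := pvScore new
    if new_score > curr_score then new
    else if new_score = curr_score ∧
        pvOrderFn framework (pvGetD new "locator_type" "") <
        pvOrderFn framework (pvGetD curr "locator_type" "") then new
    else curr

-- the body of Source B's grouping loop: groups.setdefault(name, []).append(loc)
def pvStepB (framework : String) (groups : PySem.Dict String (List (List (String × String))))
    (loc : List (String × String)) : PySem.Dict String (List (List (String × String))) :=
  if pvCompatible framework loc then groups.modify (pvName loc) [] (· ++ [loc]) else groups

-- functools.reduce(better, group); groups are never empty, so the [] case is never hit
def pvReduce (framework : String) (group : List (List (String × String))) :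
    List (String × String) :=
  match group with
  | [] => []
  | h :: t => t.foldl (pvBetter framework) h

def select_best_per_name_py_alt (locators : List (List (String × String))) (framework : String) :
    List (String × List (String × String)) :=
  ((locators.foldl (pvStepB framework) PySem.Dict.empty).items).map
    (fun p => (p.1, pvReduce framework p.2))

-- ===== PRECONDITION & SPEC =====
-- Pre_ excludes exactly the inputs on which Python's int() raises ValueError in A (and in B):
-- a compatible locator with an unparseable "stability_score" string that A actually compares,
-- i.e. one preceded by a nonempty compatible same-name locator or followed by any compatible
-- same-name locator; on every other input A returns normally and B matches it.
def Pre_select_best_per_name_py (locators : List (List (String × String))) (framework : String) : Prop :=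
  ∀ p ∈ locators.zipIdx, pvCompatible framework p.1 = true →
    (∃ v, pvGet p.1 "stability_score" = some v ∧ (PySem.Int.ofStr? v).isNone) →
    ∀ q ∈ locators.zipIdx, pvCompatible framework q.1 = true → pvName q.1 = pvName p.1 →
      (q.2 < p.2 → q.1 = []) ∧ ¬ (p.2 < q.2)

instance (locators : List (List (String × String))) (framework : String) :
    Decidable (Pre_select_best_per_name_py locators framework) := by
  unfold Pre_select_best_per_name_py; infer_instance

def pvWitness_select_best_per_name_py : (List (List (String × String))) × String :=
  ([[("custom_name", "Go"), ("stability_score", "9")],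
    [("custom_name", "Go"), ("stability_score", "12"), ("automation_tool", "Selenium")]], "selenium")

def Spec_select_best_per_name_py (locators : List (List (String × String))) (framework : String)
    (out : List (String × List (String × String))) : Prop :=
  out = select_best_per_name_py_alt locators framework

instance (locators : List (List (String × String))) (framework : String)
    (out : List (String × List (String × String))) :
    Decidable (Spec_select_best_per_name_py locators framework out) := by
  unfold Spec_select_best_per_name_py; infer_instance

-- ===== CLAIM (what is proved, stated in full; the proofs are below) =====
def Claim_equal_select_best_per_name_py : Prop :=
  ∀ (locators : List (List (String × String))) (framework : String),
    Dom_select_best_per_name_py locators framework →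
    Pre_select_best_per_name_py locators framework →
    Spec_select_best_per_name_py locators framework (select_best_per_name_py locators framework)

-- ===== LEMMAS AND PROOFS =====

-- the value map B applies to the grouped dict, and its lift to a Dict
def pvF (framework : String) (p : String × List (List (String × String))) :
    String × List (String × String) :=
  (p.1, pvReduce framework p.2)

def pvMapVal (framework : String) (gd : PySem.Dict String (List (List (String × String)))) :
    PySem.Dict String (List (String × String)) :=
  PySem.Dict.mk (gd.items.map (pvF framework))

theorem get?_pvMapVal (fw : String) (gd : PySem.Dict String (List (List (String × String))))
    (n : String) : (pvMapVal fw gd).get? n = (gd.get? n).map (fun g => pvReduce fw g) := by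
  simp [pvMapVal, PySem.Dict.get?, List.find?_map, pvF, Function.comp_def, Option.map_map]

theorem contains_pvMapVal (fw : String) (gd : PySem.Dict String (List (List (String × String))))
    (n : String) : (pvMapVal fw gd).contains n = gd.contains n := by
  simp [pvMapVal, PySem.Dict.contains, List.any_map, pvF, Function.comp_def]

theorem keys_pvMapVal (fw : String) (gd : PySem.Dict String (List (List (String × String)))) :
    (pvMapVal fw gd).keys = gd.keys := by
  simp [pvMapVal, PySem.Dict.keys, List.map_map, pvF, Function.comp_def]

theorem pvMapVal_insert (fw : String) (gd : PySem.Dict String (List (List (String × String))))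
    (n : String) (g' : List (List (String × String))) :
    pvMapVal fw (gd.insert n g') = (pvMapVal fw gd).insert n (pvReduce fw g') := by
  apply PySem.Dict.ext
  have hL : (pvMapVal fw (gd.insert n g')).items = ((gd.insert n g').items).map (pvF fw) := rfl
  have hM : (pvMapVal fw gd).items = gd.items.map (pvF fw) := rfl
  by_cases hc : gd.contains n = true
  · have hc' : (pvMapVal fw gd).contains n = true := by rw [contains_pvMapVal]; exact hc
    rw [hL, PySem.Dict.items_insert_of_contains _ _ hc,
        PySem.Dict.items_insert_of_contains _ _ hc', hM, List.map_map, List.map_map]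
    apply List.map_congr_left
    intro p _
    by_cases h : p.1 = n <;> simp [pvF, h]
  · have hcf : gd.contains n = false := by simpa using hc
    have hcf' : (pvMapVal fw gd).contains n = false := by rw [contains_pvMapVal]; exact hcf
    rw [hL, PySem.Dict.items_insert_of_not_contains _ _ hcf,
        PySem.Dict.items_insert_of_not_contains _ _ hcf', hM]
    simp [pvF]

-- a no-op insert: re-inserting the stored value leaves the dict unchanged (unique keys)
theorem insert_self_of_get? {ν : Type} (d : PySem.Dict String ν) (k : String) (v : ν)
    (hnd : d.keys.Nodup) (h : d.get? k = some v) : d.insert k v = d := by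
  have hc : d.contains k = true := by
    rw [PySem.Dict.contains_eq_isSome_get?, h]; rfl
  have hmem : (k, v) ∈ d.items := (PySem.Dict.get?_eq_some_iff_mem_items d k v hnd).mp h
  have hnd' : (d.items.map (fun x => x.1)).Nodup := hnd
  apply PySem.Dict.ext
  rw [PySem.Dict.items_insert_of_contains _ _ hc]
  conv_rhs => rw [← List.map_id d.items]
  apply List.map_congr_left
  intro p hp
  by_cases hpk : (p.1 == k) = true
  · have hp1 : p.1 = k := by simpa using hpk
    have : p = (k, v) :=
      List.inj_on_of_nodup_map hnd' hp hmem (by simpa using hp1)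
    simp [this]
  · simp [hpk]

-- reduce of a snoc: fold the new element into the running result
theorem pvReduce_append_singleton (fw : String) (g : List (List (String × String)))
    (x : List (String × String)) (h : g ≠ []) :
    pvReduce fw (g ++ [x]) = pvBetter fw (pvReduce fw g) x := by
  rcases g with _ | ⟨h0, t⟩
  · exact absurd rfl h
  · simp [pvReduce, List.foldl_append]

theorem stepA_incompat (fw : String) (bd : PySem.Dict String (List (String × String)))
    (loc : List (String × String)) (h : pvCompatible fw loc = false) :
    pvStepA fw bd loc = bd := by
  by_cases hp : fw = "playwright"
  · subst hp
    have h' : ¬(pvGetD loc "automation_tool" "Both" = "Playwright") ∧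
        ¬(pvGetD loc "automation_tool" "Both" = "Both") := by
      simpa [pvCompatible] using h
    simp [pvStepA, h'.1, h'.2]
  · by_cases hs : fw = "selenium"
    · subst hs
      have h' : ¬(pvGetD loc "automation_tool" "Both" = "Selenium") ∧
          ¬(pvGetD loc "automation_tool" "Both" = "Both") := by
        simpa [pvCompatible] using h
      simp [pvStepA, h'.1, h'.2, hp]
    · have htr : pvCompatible fw loc = true := by simp [pvCompatible, hp, hs]
      rw [htr] at h
      cases h

-- A's loop body on a compatible locator with a stored current best is an insert of `better`
theorem stepA_compat_some (fw : String) (bd : PySem.Dict String (List (String × String)))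
    (loc curr : List (String × String)) (hnd : bd.keys.Nodup)
    (hcomp : pvCompatible fw loc = true) (hget : bd.get? (pvName loc) = some curr) :
    pvStepA fw bd loc = bd.insert (pvName loc) (pvBetter fw curr loc) := by
  have hC1 : ¬(fw = "playwright" ∧
      ¬(pvGetD loc "automation_tool" "Both" = "Playwright" ∨
        pvGetD loc "automation_tool" "Both" = "Both")) := by
    rintro ⟨rfl, hno⟩
    exact hno (by simpa [pvCompatible] using hcomp)
  have hC2 : ¬(fw = "selenium" ∧
      ¬(pvGetD loc "automation_tool" "Both" = "Selenium" ∨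
        pvGetD loc "automation_tool" "Both" = "Both")) := by
    rintro ⟨rfl, hno⟩
    exact hno (by simpa [pvCompatible] using hcomp)
  simp only [pvStepA, if_neg hC1, if_neg hC2, hget]
  by_cases hc0 : curr = []
  · simp [pvBetter, hc0]
  · rw [if_neg hc0]
    simp only [pvBetter, if_neg hc0]
    by_cases hgt : pvScore loc > pvScore curr
    · simp only [if_pos hgt]
    · rw [if_neg hgt, if_neg hgt]
      by_cases heq : pvScore loc = pvScore curr
      · rw [if_pos heq]
        by_cases hp : fw = "playwright"
        · subst hp
          rw [if_pos rfl]
          by_cases hord : prefer_order_playwright (pvGetD loc "locator_type" "") <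
              prefer_order_playwright (pvGetD curr "locator_type" "")
          · rw [if_pos hord, if_pos ⟨heq, by simpa [pvOrderFn] using hord⟩]
          · rw [if_neg hord, if_neg (by rintro ⟨-, h2⟩; exact hord (by simpa [pvOrderFn] using h2)),
                insert_self_of_get? _ _ _ hnd hget]
        · rw [if_neg hp]
          by_cases hord : prefer_order_selenium (pvGetD loc "locator_type" "") <
              prefer_order_selenium (pvGetD curr "locator_type" "")
          · rw [if_pos hord, if_pos ⟨heq, by simpa [pvOrderFn, hp] using hord⟩]
          · rw [if_neg hord, if_neg (by rintro ⟨-, h2⟩; exact hord (by simpa [pvOrderFn, hp] using h2)),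
                insert_self_of_get? _ _ _ hnd hget]
      · rw [if_neg heq, if_neg (by rintro ⟨h1, -⟩; exact heq h1),
            insert_self_of_get? _ _ _ hnd hget]

theorem select_best_step (fw : String) (loc : List (String × String))
    (gd : PySem.Dict String (List (List (String × String)))) (hnd : gd.keys.Nodup)
    (hne : ∀ p ∈ gd.items, p.2 ≠ []) :
    pvStepA fw (pvMapVal fw gd) loc = pvMapVal fw (pvStepB fw gd loc) := by
  by_cases hcomp : pvCompatible fw loc = true
  case neg =>
    have hcf : pvCompatible fw loc = false := by simpa using hcomp
    rw [stepA_incompat fw _ loc hcf]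
    simp [pvStepB, hcf]
  case pos =>
    simp only [pvStepB, if_pos hcomp, PySem.Dict.modify]
    rcases hgn : gd.get? (pvName loc) with _ | g
    · have hgd : gd.getD (pvName loc) [] = [] := by simp [PySem.Dict.getD, hgn]
      have hC1 : ¬(fw = "playwright" ∧
          ¬(pvGetD loc "automation_tool" "Both" = "Playwright" ∨
            pvGetD loc "automation_tool" "Both" = "Both")) := by
        rintro ⟨rfl, hno⟩
        exact hno (by simpa [pvCompatible] using hcomp)
      have hC2 : ¬(fw = "selenium" ∧
          ¬(pvGetD loc "automation_tool" "Both" = "Selenium" ∨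
            pvGetD loc "automation_tool" "Both" = "Both")) := by
        rintro ⟨rfl, hno⟩
        exact hno (by simpa [pvCompatible] using hcomp)
      have hgetM : (pvMapVal fw gd).get? (pvName loc) = none := by
        rw [get?_pvMapVal, hgn]; rfl
      simp only [pvStepA, if_neg hC1, if_neg hC2, hgetM]
      rw [hgd, List.nil_append, pvMapVal_insert]
      rfl
    · have hgd : gd.getD (pvName loc) [] = g := by simp [PySem.Dict.getD, hgn]
      have hgne : g ≠ [] :=
        hne _ ((PySem.Dict.get?_eq_some_iff_mem_items _ _ _ hnd).mp hgn)
      have hndM : (pvMapVal fw gd).keys.Nodup := by rw [keys_pvMapVal]; exact hnd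
      have hgetM : (pvMapVal fw gd).get? (pvName loc) = some (pvReduce fw g) := by
        rw [get?_pvMapVal, hgn]; rfl
      rw [stepA_compat_some fw _ loc (pvReduce fw g) hndM hcomp hgetM, hgd,
          pvMapVal_insert, pvReduce_append_singleton fw g loc hgne]

theorem select_best_fold (fw : String) (locs : List (List (String × String))) :
    locs.foldl (pvStepA fw) PySem.Dict.empty
        = pvMapVal fw (locs.foldl (pvStepB fw) PySem.Dict.empty)
      ∧ (locs.foldl (pvStepB fw) PySem.Dict.empty).keys.Nodup
      ∧ ∀ p ∈ (locs.foldl (pvStepB fw) PySem.Dict.empty).items, p.2 ≠ [] := by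
  induction locs using List.reverseRecOn with
  | nil =>
    refine ⟨by apply PySem.Dict.ext; rfl, by simp [PySem.Dict.keys, PySem.Dict.empty], ?_⟩
    intro p hp
    simp [PySem.Dict.empty] at hp
  | append_singleton l x ih =>
    obtain ⟨ih1, ih2, ih3⟩ := ih
    simp only [List.foldl_append, List.foldl_cons, List.foldl_nil]
    refine ⟨?_, ?_, ?_⟩
    · rw [ih1]; exact select_best_step fw x _ ih2 ih3
    · simp only [pvStepB]
      split
      · simp only [PySem.Dict.modify]
        exact PySem.Dict.nodup_keys_insert _ _ _ ih2
      · exact ih2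
    · intro p hp
      simp only [pvStepB] at hp
      by_cases hc : pvCompatible fw x = true
      · rw [if_pos hc] at hp
        simp only [PySem.Dict.modify] at hp
        rcases (PySem.Dict.mem_items_insert _ _ _ _).mp hp with hpeq | ⟨hpold, -⟩
        · simp [hpeq]
        · exact ih3 p hpold
      · rw [if_neg hc] at hp
        exact ih3 p hp

-- ===== VERDICT (by name: the statement is the Claim_ definition above) =====
theorem select_best_per_name_py_spec : Claim_equal_select_best_per_name_py := by
  intro locators framework _hdom _hpre
  unfold Spec_select_best_per_name_py
  unfold select_best_per_name_py select_best_per_name_py_alt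
  obtain ⟨heq, -, -⟩ := select_best_fold framework locators
  rw [heq]
  simp [pvMapVal, pvF]
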